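-- pv_equiv track=rewrite | github.com/HanXudong/GLoM | Model/Evaluation.py | Test_conditios
-- ===== SOURCE A (Python) =====
-- def Test_conditios(Train_truples, Test_truples):
--
--     Choosen_instances_reference = set([i[0] for i in Train_truples])
--     Choosen_instances_modifier = set([i[1] for i in Train_truples])
--     Choosen_instances_target = set([i[2] for i in Train_truples])
--
--     Seen_pairings = []
--     Unseen_Pairings = []
--     Unseen_Reference = []
--     Unseen_Modifier = []
--     Fully_Unseen = []
--
--
--     for i in range(len(Test_truples)):
--         r, m, t = Test_truples[i]
--         s_unseen_r = not r in Choosen_instances_reference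
--         s_unseen_m = not m in Choosen_instances_modifier
--         if s_unseen_r and s_unseen_m:
--             Fully_Unseen.append(i)
--         elif s_unseen_r:
--             Unseen_Reference.append(i)
--         elif s_unseen_m:
--             Unseen_Modifier.append(i)
--         else:
--             if Test_truples[i] in Train_truples:
--                 Seen_pairings.append(i)
--             else:
--                 Unseen_Pairings.append(i)
--
--     Conditions = {}
--     Conditions["Fully_Unseen"] = Fully_Unseen
--     Conditions["Unseen_Reference"] = Unseen_Reference
--     Conditions["Unseen_Modifier"] = Unseen_Modifier
--     Conditions["Seen_pairings"] = Seen_pairings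
--     Conditions["Unseen_Pairings"] = Unseen_Pairings
--
--     return Conditions
-- ===== SOURCE B (Python) =====
-- def Test_conditios(Train_truples, Test_truples):
--     refs = set(r for r, m, t in Train_truples)
--     mods = set(m for r, m, t in Train_truples)
--     Conditions = {
--         "Fully_Unseen": [i for i, (r, m, t) in enumerate(Test_truples)
--                          if r not in refs and m not in mods],
--         "Unseen_Reference": [i for i, (r, m, t) in enumerate(Test_truples)
--                              if r not in refs and m in mods],
--         "Unseen_Modifier": [i for i, (r, m, t) in enumerate(Test_truples)
--                             if r in refs and m not in mods],
--         "Seen_pairings": [i for i, trip in enumerate(Test_truples)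
--                           if trip[0] in refs and trip[1] in mods and trip in Train_truples],
--         "Unseen_Pairings": [i for i, trip in enumerate(Test_truples)
--                             if trip[0] in refs and trip[1] in mods and trip not in Train_truples],
--     }
--     return Conditions
-- ===== Notes on version B (the rewrite author's own statement) =====
-- stated objective: alternative
-- what changed: Replaces the single stateful loop with its precedence elif-chain and five accumulators by five independent enumerate-based filtering passes, one per bucket, each testing an explicit mutually-exclusive condition; the dict is built in one literal.
import Mathlib
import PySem

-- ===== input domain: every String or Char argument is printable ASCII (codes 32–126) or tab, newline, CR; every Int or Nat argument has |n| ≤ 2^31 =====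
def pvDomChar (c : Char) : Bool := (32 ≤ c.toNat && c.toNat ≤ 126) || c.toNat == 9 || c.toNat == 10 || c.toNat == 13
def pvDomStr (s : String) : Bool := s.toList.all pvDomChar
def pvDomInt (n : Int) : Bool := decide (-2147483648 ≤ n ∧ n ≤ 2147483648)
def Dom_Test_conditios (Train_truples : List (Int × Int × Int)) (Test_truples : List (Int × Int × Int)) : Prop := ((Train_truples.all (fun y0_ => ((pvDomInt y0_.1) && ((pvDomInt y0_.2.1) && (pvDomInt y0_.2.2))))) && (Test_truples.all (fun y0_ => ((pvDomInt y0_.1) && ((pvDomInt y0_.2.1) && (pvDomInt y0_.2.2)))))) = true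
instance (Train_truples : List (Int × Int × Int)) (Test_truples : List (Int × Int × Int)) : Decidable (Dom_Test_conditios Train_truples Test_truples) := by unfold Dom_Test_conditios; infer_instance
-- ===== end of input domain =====

-- B replaces A's single precedence if/elif loop with five independent filtering passes
-- (one per output bucket); same return value, an alternative decomposition, not claimed faster.
-- ===== PORT A =====
-- A builds three membership sets, then one loop over indices classifies each test triple
-- by an if/elif precedence chain into five accumulator lists, assembled into a dict.
def pyLoopA (Train_truples : List (Int × Int × Int)) (refS modS : PySem.Set Int) :
    List (Int × (Int × Int × Int)) → List Int → List Int → List Int → List Int → List Int →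
    (List Int × List Int × List Int × List Int × List Int)
  | [], S, UP, UR, UM, FU => (S, UP, UR, UM, FU)
  | (i, (r, m, t)) :: rest, S, UP, UR, UM, FU =>
    let s_unseen_r := !(PySem.Set.contains refS r)
    let s_unseen_m := !(PySem.Set.contains modS m)
    if s_unseen_r && s_unseen_m then
      pyLoopA Train_truples refS modS rest S UP UR UM (FU ++ [i])
    else if s_unseen_r then
      pyLoopA Train_truples refS modS rest S UP (UR ++ [i]) UM FU
    else if s_unseen_m then
      pyLoopA Train_truples refS modS rest S UP UR (UM ++ [i]) FU
    else if (r, m, t) ∈ Train_truples then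
      pyLoopA Train_truples refS modS rest (S ++ [i]) UP UR UM FU
    else
      pyLoopA Train_truples refS modS rest S (UP ++ [i]) UR UM FU

def Test_conditios (Train_truples : List (Int × Int × Int)) (Test_truples : List (Int × Int × Int)) : List (String × List Int) :=
  let refS := PySem.Set.ofList (Train_truples.map (fun i => i.1))
  let modS := PySem.Set.ofList (Train_truples.map (fun i => i.2.1))
  let _tgtS := PySem.Set.ofList (Train_truples.map (fun i => i.2.2))  -- computed but unused, as in A
  match pyLoopA Train_truples refS modS (PySem.List.enumerate Test_truples 0) [] [] [] [] [] with
  | (S, UP, UR, UM, FU) =>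
    let C : PySem.Dict String (List Int) := PySem.Dict.empty
    let C := C.insert "Fully_Unseen" FU
    let C := C.insert "Unseen_Reference" UR
    let C := C.insert "Unseen_Modifier" UM
    let C := C.insert "Seen_pairings" S
    let C := C.insert "Unseen_Pairings" UP
    C.items

-- ===== PORT B =====
-- B: five independent enumerate-based filtering passes, one per bucket; dict built as a literal.
def Test_conditios_alt (Train_truples : List (Int × Int × Int)) (Test_truples : List (Int × Int × Int)) : List (String × List Int) :=
  let refs := PySem.Set.ofList (Train_truples.map (fun i => i.1))
  let mods := PySem.Set.ofList (Train_truples.map (fun i => i.2.1))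
  let en := PySem.List.enumerate Test_truples 0
  [ ("Fully_Unseen",
      (en.filter (fun p => !(PySem.Set.contains refs p.2.1) && !(PySem.Set.contains mods p.2.2.1))).map (fun p => p.1)),
    ("Unseen_Reference",
      (en.filter (fun p => !(PySem.Set.contains refs p.2.1) && PySem.Set.contains mods p.2.2.1)).map (fun p => p.1)),
    ("Unseen_Modifier",
      (en.filter (fun p => PySem.Set.contains refs p.2.1 && !(PySem.Set.contains mods p.2.2.1))).map (fun p => p.1)),
    ("Seen_pairings",
      (en.filter (fun p => PySem.Set.contains refs p.2.1 && PySem.Set.contains mods p.2.2.1 && decide (p.2 ∈ Train_truples))).map (fun p => p.1)),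
    ("Unseen_Pairings",
      (en.filter (fun p => PySem.Set.contains refs p.2.1 && PySem.Set.contains mods p.2.2.1 && !decide (p.2 ∈ Train_truples))).map (fun p => p.1)) ]

-- ===== PRECONDITION & SPEC =====
def Spec_Test_conditios (Train_truples : List (Int × Int × Int)) (Test_truples : List (Int × Int × Int)) (out : List (String × List Int)) : Prop := out = Test_conditios_alt Train_truples Test_truples
instance (Train_truples : List (Int × Int × Int)) (Test_truples : List (Int × Int × Int)) (out : List (String × List Int)) : Decidable (Spec_Test_conditios Train_truples Test_truples out) := by unfold Spec_Test_conditios; infer_instance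

-- ===== CLAIM (what is proved, stated in full; the proofs are below) =====
def Claim_equal_Test_conditios : Prop := ∀ (Train_truples : List (Int × Int × Int)) (Test_truples : List (Int × Int × Int)), Dom_Test_conditios Train_truples Test_truples → Spec_Test_conditios Train_truples Test_truples (Test_conditios Train_truples Test_truples)

-- ===== LEMMAS AND PROOFS =====

theorem pyLoopA_eq (Train_truples : List (Int × Int × Int)) (refS modS : PySem.Set Int)
    (l : List (Int × (Int × Int × Int))) :
    ∀ (S UP UR UM FU : List Int),
    pyLoopA Train_truples refS modS l S UP UR UM FU =
      (S ++ (l.filter (fun p => PySem.Set.contains refS p.2.1 && PySem.Set.contains modS p.2.2.1 && decide (p.2 ∈ Train_truples))).map (fun p => p.1),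
       UP ++ (l.filter (fun p => PySem.Set.contains refS p.2.1 && PySem.Set.contains modS p.2.2.1 && !decide (p.2 ∈ Train_truples))).map (fun p => p.1),
       UR ++ (l.filter (fun p => !(PySem.Set.contains refS p.2.1) && PySem.Set.contains modS p.2.2.1)).map (fun p => p.1),
       UM ++ (l.filter (fun p => PySem.Set.contains refS p.2.1 && !(PySem.Set.contains modS p.2.2.1))).map (fun p => p.1),
       FU ++ (l.filter (fun p => !(PySem.Set.contains refS p.2.1) && !(PySem.Set.contains modS p.2.2.1))).map (fun p => p.1)) := by
  induction l with
  | nil => intro S UP UR UM FU; simp [pyLoopA]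
  | cons hd tl ih =>
    obtain ⟨i, r, m, t⟩ := hd
    intro S UP UR UM FU
    by_cases hr : r ∈ refS <;> by_cases hm : m ∈ modS <;>
      by_cases ht : (r, m, t) ∈ Train_truples <;>
      simp [pyLoopA, hr, hm, ht, ih, List.append_assoc]

-- ===== VERDICT (by name: the statement is the Claim_ definition above) =====
theorem Test_conditios_spec : Claim_equal_Test_conditios := by
  intro Train_truples Test_truples _
  unfold Spec_Test_conditios Test_conditios Test_conditios_alt
  simp only [pyLoopA_eq]
  rfl
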